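-- pv_equiv track=rewrite | github.com/Kim-Jeong-Ju/Algorithm_Python | 094_alone_tick_tack_toe.py | array_check
-- ===== SOURCE A (Python) =====
-- from itertools import combinations
--
-- def array_check(array):
--     o_bingo, o_cnt, o_locs = 0, 0, []
--     x_bingo, x_cnt, x_locs = 0, 0, []
--
--     for row in range(3):
--         for col in range(3):
--             if array[row][col] == 'O':
--                 o_cnt += 1
--                 o_locs.append((row, col))
--             elif array[row][col] == 'X':
--                 x_cnt += 1
--                 x_locs.append((row, col))
--
--     for aa, bb, cc in combinations(o_locs, 3):
--         if aa[0] == bb[0] == cc[0] and aa[1] - bb[1] == bb[1] - cc[1] == -1: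
--             o_bingo += 1
--         elif aa[0] - bb[0] == bb[0] - cc[0] == -1 and aa[1] == bb[1] == cc[1]:
--             o_bingo += 1
--         elif aa[0] - bb[0] == bb[0] - cc[0] == -1 and aa[1] - bb[1] == bb[1] - cc[1] == -1:
--             o_bingo += 1
--         elif aa[0] - bb[0] == bb[0] - cc[0] == -1 and aa[1] - bb[1] == bb[1] - cc[1] == 1:
--             o_bingo += 1
--
--     for dd, ee, ff in combinations(x_locs, 3):
--         if dd[0] == ee[0] == ff[0] and dd[1] - ee[1] == ee[1] - ff[1] == -1:
--             x_bingo += 1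
--         elif dd[0] - ee[0] == ee[0] - ff[0] == -1 and dd[1] == ee[1] == ff[1]:
--             x_bingo += 1
--         elif dd[0] - ee[0] == ee[0] - ff[0] == -1 and dd[1] - ee[1] == ee[1] - ff[1] == -1:
--             x_bingo += 1
--         elif dd[0] - ee[0] == ee[0] - ff[0] == -1 and dd[1] - ee[1] == ee[1] - ff[1] == 1:
--             x_bingo += 1
--
--     return o_bingo, o_cnt, x_bingo, x_cnt
-- ===== SOURCE B (Python) =====
-- # B: single scan into position sets + fixed table of the 8 winning lines (simpler than A's combinations search).
-- LINES = [
--     ((0, 0), (0, 1), (0, 2)),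
--     ((1, 0), (1, 1), (1, 2)),
--     ((2, 0), (2, 1), (2, 2)),
--     ((0, 0), (1, 0), (2, 0)),
--     ((0, 1), (1, 1), (2, 1)),
--     ((0, 2), (1, 2), (2, 2)),
--     ((0, 0), (1, 1), (2, 2)),
--     ((0, 2), (1, 1), (2, 0)),
-- ]
--
-- def array_check(array):
--     o_cnt, x_cnt = 0, 0
--     o_set, x_set = set(), set()
--     for row in range(3):
--         for col in range(3):
--             v = array[row][col]
--             if v == 'O':
--                 o_cnt += 1
--                 o_set.add((row, col))
--             elif v == 'X':
--                 x_cnt += 1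
--                 x_set.add((row, col))
--     o_bingo = sum(1 for line in LINES if o_set.issuperset(line))
--     x_bingo = sum(1 for line in LINES if x_set.issuperset(line))
--     return o_bingo, o_cnt, x_bingo, x_cnt
-- ===== Notes on version B (the rewrite author's own statement) =====
-- stated objective: simpler
-- what changed: Replaces A's brute-force scan over all 3-combinations of each symbol's positions with arithmetic line tests by a fixed table of the 8 winning lines checked for containment in a position set built in one scan.
import Mathlib
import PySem

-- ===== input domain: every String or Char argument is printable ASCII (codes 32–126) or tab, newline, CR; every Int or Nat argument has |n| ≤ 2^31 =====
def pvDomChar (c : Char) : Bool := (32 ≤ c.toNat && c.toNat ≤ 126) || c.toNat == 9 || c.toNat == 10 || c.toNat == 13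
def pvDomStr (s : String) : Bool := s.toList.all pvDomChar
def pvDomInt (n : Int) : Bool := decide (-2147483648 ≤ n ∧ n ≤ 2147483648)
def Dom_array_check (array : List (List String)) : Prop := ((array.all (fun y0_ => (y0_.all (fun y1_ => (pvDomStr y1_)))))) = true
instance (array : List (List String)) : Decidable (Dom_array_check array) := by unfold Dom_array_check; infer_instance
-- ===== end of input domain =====

-- B replaces A's scan over all 3-combinations of each symbol's positions by a fixed table of
-- the 8 winning lines checked against a position set (objective: simpler).

-- ===== PORT A =====
-- array[row][col]: Python raises IndexError out of range; Pre_array_check excludes those boards,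
-- so the .getD defaults below are never reached on admitted inputs.
def pvCell (array : List (List String)) (r c : Int) : String :=
  (PySem.List.pyGet? ((PySem.List.pyGet? array r).getD []) c).getD ""

-- the itertools.combinations(locs, 3) stream, in Python's order
def pvCombos2 {α : Type} : List α → List (α × α)
  | [] => []
  | a :: rest => rest.map (fun b => (a, b)) ++ pvCombos2 rest

def pvCombos3 {α : Type} : List α → List (α × α × α)
  | [] => []
  | a :: rest => (pvCombos2 rest).map (fun bc => (a, bc.1, bc.2)) ++ pvCombos3 rest

-- the double scan: state (o_cnt, o_locs, x_cnt, x_locs)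
def pvScanA (array : List (List String)) : Int × List (Int × Int) × Int × List (Int × Int) :=
  (PySem.List.pyRange 0 3 1).foldl (fun st row =>
    (PySem.List.pyRange 0 3 1).foldl (fun st col =>
      let v := pvCell array row col
      if v == "O" then (st.1 + 1, st.2.1 ++ [(row, col)], st.2.2.1, st.2.2.2)
      else if v == "X" then (st.1, st.2.1, st.2.2.1 + 1, st.2.2.2 ++ [(row, col)])
      else st) st)
    ((0 : Int), ([] : List (Int × Int)), (0 : Int), ([] : List (Int × Int)))

-- A's bingo loop body (identical for the o and x loops)
def pvBingoA (locs : List (Int × Int)) : Int :=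
  (pvCombos3 locs).foldl (fun bingo t =>
    let aa := t.1; let bb := t.2.1; let cc := t.2.2
    if aa.1 == bb.1 && bb.1 == cc.1 && aa.2 - bb.2 == bb.2 - cc.2 && bb.2 - cc.2 == (-1 : Int) then bingo + 1
    else if aa.1 - bb.1 == bb.1 - cc.1 && bb.1 - cc.1 == (-1 : Int) && aa.2 == bb.2 && bb.2 == cc.2 then bingo + 1
    else if aa.1 - bb.1 == bb.1 - cc.1 && bb.1 - cc.1 == (-1 : Int) && aa.2 - bb.2 == bb.2 - cc.2 && bb.2 - cc.2 == (-1 : Int) then bingo + 1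
    else if aa.1 - bb.1 == bb.1 - cc.1 && bb.1 - cc.1 == (-1 : Int) && aa.2 - bb.2 == bb.2 - cc.2 && bb.2 - cc.2 == (1 : Int) then bingo + 1
    else bingo) 0

def array_check (array : List (List String)) : Int × Int × Int × Int :=
  let st := pvScanA array
  (pvBingoA st.2.1, st.1, pvBingoA st.2.2.2, st.2.2.1)

-- ===== PORT B =====
def pvLines : List ((Int × Int) × (Int × Int) × (Int × Int)) :=
  [(((0 : Int), (0 : Int)), (0, 1), (0, 2)),
   ((1, 0), (1, 1), (1, 2)),
   ((2, 0), (2, 1), (2, 2)),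
   ((0, 0), (1, 0), (2, 0)),
   ((0, 1), (1, 1), (2, 1)),
   ((0, 2), (1, 2), (2, 2)),
   ((0, 0), (1, 1), (2, 2)),
   ((0, 2), (1, 1), (2, 0))]

def pvScanB (array : List (List String)) : Int × PySem.Set (Int × Int) × Int × PySem.Set (Int × Int) :=
  (PySem.List.pyRange 0 3 1).foldl (fun st row =>
    (PySem.List.pyRange 0 3 1).foldl (fun st col =>
      let v := pvCell array row col
      if v == "O" then (st.1 + 1, PySem.Set.add st.2.1 (row, col), st.2.2.1, st.2.2.2)
      else if v == "X" then (st.1, st.2.1, st.2.2.1 + 1, PySem.Set.add st.2.2.2 (row, col))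
      else st) st)
    ((0 : Int), (PySem.Set.empty : PySem.Set (Int × Int)), (0 : Int), (PySem.Set.empty : PySem.Set (Int × Int)))

-- sum(1 for line in LINES if s.issuperset(line))
def pvLineCount (s : PySem.Set (Int × Int)) : Int :=
  pvLines.foldl (fun acc l => acc + (if PySem.Set.issuperset s [l.1, l.2.1, l.2.2] then 1 else 0)) 0

def array_check_alt (array : List (List String)) : Int × Int × Int × Int :=
  let st := pvScanB array
  (pvLineCount st.2.1, st.1, pvLineCount st.2.2.2, st.2.2.1)

-- ===== PRECONDITION & SPEC =====
-- Pre_ excludes exactly the boards on which Python's array[row][col] (row, col < 3) raises IndexError.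
def Pre_array_check (array : List (List String)) : Prop :=
  3 ≤ array.length ∧ ∀ row ∈ array.take 3, 3 ≤ row.length
instance (array : List (List String)) : Decidable (Pre_array_check array) := by
  unfold Pre_array_check; infer_instance

def pvWitness_array_check : List (List String) :=
  [["O", "X", "O"], ["X", "O", "X"], ["O", ".", "X"]]

def Spec_array_check (array : List (List String)) (out : Int × Int × Int × Int) : Prop := out = array_check_alt array
instance (array : List (List String)) (out : Int × Int × Int × Int) : Decidable (Spec_array_check array out) := by unfold Spec_array_check; infer_instance

-- ===== CLAIM (what is proved, stated in full; the proofs are below) =====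
def Claim_equal_array_check : Prop := ∀ (array : List (List String)), Dom_array_check array → Pre_array_check array → Spec_array_check array (array_check array)

-- ===== LEMMAS AND PROOFS =====
-- Proof plan: both scans are the same fold over the nine board positions; a fold lemma
-- characterizes each scan by counts and filtered position lists; a 512-case decide shows
-- A's combination count equals B's line count on every sublist of the nine positions.

def pvPairs : List (Int × Int) :=
  [(0, 0), (0, 1), (0, 2), (1, 0), (1, 1), (1, 2), (2, 0), (2, 1), (2, 2)]

def pvStepA (array : List (List String)) (st : Int × List (Int × Int) × Int × List (Int × Int))
    (p : Int × Int) : Int × List (Int × Int) × Int × List (Int × Int) :=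
  let v := pvCell array p.1 p.2
  if v == "O" then (st.1 + 1, st.2.1 ++ [(p.1, p.2)], st.2.2.1, st.2.2.2)
  else if v == "X" then (st.1, st.2.1, st.2.2.1 + 1, st.2.2.2 ++ [(p.1, p.2)])
  else st

def pvStepB (array : List (List String)) (st : Int × PySem.Set (Int × Int) × Int × PySem.Set (Int × Int))
    (p : Int × Int) : Int × PySem.Set (Int × Int) × Int × PySem.Set (Int × Int) :=
  let v := pvCell array p.1 p.2
  if v == "O" then (st.1 + 1, PySem.Set.add st.2.1 (p.1, p.2), st.2.2.1, st.2.2.2)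
  else if v == "X" then (st.1, st.2.1, st.2.2.1 + 1, PySem.Set.add st.2.2.2 (p.1, p.2))
  else st

def pvIsO (array : List (List String)) (p : Int × Int) : Bool := pvCell array p.1 p.2 == "O"
def pvIsX (array : List (List String)) (p : Int × Int) : Bool := pvCell array p.1 p.2 == "X"

theorem pvRange3 : PySem.List.pyRange 0 3 1 = [0, 1, 2] := by decide

theorem pvRowA (array : List (List String)) (row : Int)
    (st : Int × List (Int × Int) × Int × List (Int × Int)) :
    List.foldl (fun st col =>
      let v := pvCell array row col
      if v == "O" then (st.1 + 1, st.2.1 ++ [(row, col)], st.2.2.1, st.2.2.2)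
      else if v == "X" then (st.1, st.2.1, st.2.2.1 + 1, st.2.2.2 ++ [(row, col)])
      else st) st ([0, 1, 2] : List Int)
    = List.foldl (pvStepA array) st [(row, 0), (row, 1), (row, 2)] := by
  simp only [List.foldl_cons, List.foldl_nil, pvStepA]

theorem pvRowB (array : List (List String)) (row : Int)
    (st : Int × PySem.Set (Int × Int) × Int × PySem.Set (Int × Int)) :
    List.foldl (fun st col =>
      let v := pvCell array row col
      if v == "O" then (st.1 + 1, PySem.Set.add st.2.1 (row, col), st.2.2.1, st.2.2.2)
      else if v == "X" then (st.1, st.2.1, st.2.2.1 + 1, PySem.Set.add st.2.2.2 (row, col))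
      else st) st ([0, 1, 2] : List Int)
    = List.foldl (pvStepB array) st [(row, 0), (row, 1), (row, 2)] := by
  simp only [List.foldl_cons, List.foldl_nil, pvStepB]

theorem pvScanA_pairs (array : List (List String)) :
    pvScanA array = pvPairs.foldl (pvStepA array) (0, [], 0, []) := by
  unfold pvScanA
  rw [pvRange3]
  rw [List.foldl_cons, List.foldl_cons, List.foldl_cons, List.foldl_nil]
  rw [pvRowA, pvRowA, pvRowA]
  rw [show pvPairs = [((0 : Int), (0 : Int)), (0, 1), (0, 2)] ++
    ([(1, 0), (1, 1), (1, 2)] ++ [(2, 0), (2, 1), (2, 2)]) from rfl]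
  rw [List.foldl_append, List.foldl_append]

theorem pvScanB_pairs (array : List (List String)) :
    pvScanB array = pvPairs.foldl (pvStepB array) (0, PySem.Set.empty, 0, PySem.Set.empty) := by
  unfold pvScanB
  rw [pvRange3]
  rw [List.foldl_cons, List.foldl_cons, List.foldl_cons, List.foldl_nil]
  rw [pvRowB, pvRowB, pvRowB]
  rw [show pvPairs = [((0 : Int), (0 : Int)), (0, 1), (0, 2)] ++
    ([(1, 0), (1, 1), (1, 2)] ++ [(2, 0), (2, 1), (2, 2)]) from rfl]
  rw [List.foldl_append, List.foldl_append]

theorem pvFoldA (array : List (List String)) (ps : List (Int × Int)) (oc xc : Int)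
    (ol xl : List (Int × Int)) :
    ps.foldl (pvStepA array) (oc, ol, xc, xl) =
      (oc + ((ps.filter (pvIsO array)).length : Int), ol ++ ps.filter (pvIsO array),
       xc + ((ps.filter (pvIsX array)).length : Int), xl ++ ps.filter (pvIsX array)) := by
  induction ps generalizing oc ol xc xl with
  | nil => simp
  | cons p tl ih =>
    obtain ⟨p1, p2⟩ := p
    simp only [List.foldl_cons, pvStepA, List.filter_cons]
    by_cases hO : pvCell array p1 p2 = "O"
    · have hX : ¬ pvCell array p1 p2 = "X" := by rw [hO]; decide
      simp [pvIsO, pvIsX, hO, ih, List.append_assoc]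
      omega
    · by_cases hX : pvCell array p1 p2 = "X"
      · simp [pvIsO, pvIsX, hX, ih, List.append_assoc]
        omega
      · simp [pvIsO, pvIsX, hO, hX, ih]

theorem pvFoldB (array : List (List String)) (ps : List (Int × Int)) (oc xc : Int)
    (ol xl : List (Int × Int)) (hnd : ps.Nodup)
    (hol : ∀ p ∈ ps, p ∉ ol) (hxl : ∀ p ∈ ps, p ∉ xl) :
    ps.foldl (pvStepB array) (oc, ol, xc, xl) =
      (oc + ((ps.filter (pvIsO array)).length : Int), ol ++ ps.filter (pvIsO array),
       xc + ((ps.filter (pvIsX array)).length : Int), xl ++ ps.filter (pvIsX array)) := by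
  induction ps generalizing oc ol xc xl with
  | nil => simp
  | cons p tl ih =>
    obtain ⟨hptl, hndtl⟩ := List.nodup_cons.mp hnd
    obtain ⟨p1, p2⟩ := p
    have hpol : (p1, p2) ∉ ol := hol (p1, p2) (by simp)
    have hpxl : (p1, p2) ∉ xl := hxl (p1, p2) (by simp)
    have holtl : ∀ q ∈ tl, q ∉ ol ++ [(p1, p2)] := by
      intro q hq
      simp only [List.mem_append, List.mem_singleton]
      rintro (h | rfl)
      · exact hol q (by simp [hq]) h
      · exact hptl hq
    have hxltl : ∀ q ∈ tl, q ∉ xl ++ [(p1, p2)] := by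
      intro q hq
      simp only [List.mem_append, List.mem_singleton]
      rintro (h | rfl)
      · exact hxl q (by simp [hq]) h
      · exact hptl hq
    simp only [List.foldl_cons, pvStepB, List.filter_cons]
    by_cases hO : pvCell array p1 p2 = "O"
    · have hX : ¬ pvCell array p1 p2 = "X" := by rw [hO]; decide
      have hadd : PySem.Set.add ol (p1, p2) = ol ++ [(p1, p2)] := by
        simp [PySem.Set.add, PySem.Set.contains, hpol]
      rw [if_pos (by simp [hO] : (pvCell array ((p1, p2) : Int × Int).1 (p1, p2).2 == "O") = true),
        hadd, ih _ _ _ _ hndtl holtl (fun q hq => hxl q (by simp [hq]))]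
      simp [pvIsO, pvIsX, hO, List.append_assoc]
      omega
    · by_cases hX : pvCell array p1 p2 = "X"
      · have hadd : PySem.Set.add xl (p1, p2) = xl ++ [(p1, p2)] := by
          simp [PySem.Set.add, PySem.Set.contains, hpxl]
        rw [if_neg (by simp [hO] : ¬ (pvCell array ((p1, p2) : Int × Int).1 (p1, p2).2 == "O") = true),
          if_pos (by simp [hX] : (pvCell array ((p1, p2) : Int × Int).1 (p1, p2).2 == "X") = true),
          hadd, ih _ _ _ _ hndtl (fun q hq => hol q (by simp [hq])) hxltl]
        simp [pvIsO, pvIsX, hX, List.append_assoc]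
        omega
      · rw [if_neg (by simp [hO] : ¬ (pvCell array ((p1, p2) : Int × Int).1 (p1, p2).2 == "O") = true),
          if_neg (by simp [hX] : ¬ (pvCell array ((p1, p2) : Int × Int).1 (p1, p2).2 == "X") = true),
          ih _ _ _ _ hndtl (fun q hq => hol q (by simp [hq])) (fun q hq => hxl q (by simp [hq]))]
        simp [pvIsO, pvIsX, hO, hX]

-- every possible filtered sublist of the nine positions, indexed by nine Booleans
def pvLocs8 (b8 : Bool) : List (Int × Int) := if b8 then [(2, 2)] else []
def pvLocs7 (b7 b8 : Bool) : List (Int × Int) := if b7 then (2, 1) :: pvLocs8 b8 else pvLocs8 b8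
def pvLocs6 (b6 b7 b8 : Bool) : List (Int × Int) := if b6 then (2, 0) :: pvLocs7 b7 b8 else pvLocs7 b7 b8
def pvLocs5 (b5 b6 b7 b8 : Bool) : List (Int × Int) := if b5 then (1, 2) :: pvLocs6 b6 b7 b8 else pvLocs6 b6 b7 b8
def pvLocs4 (b4 b5 b6 b7 b8 : Bool) : List (Int × Int) := if b4 then (1, 1) :: pvLocs5 b5 b6 b7 b8 else pvLocs5 b5 b6 b7 b8
def pvLocs3 (b3 b4 b5 b6 b7 b8 : Bool) : List (Int × Int) := if b3 then (1, 0) :: pvLocs4 b4 b5 b6 b7 b8 else pvLocs4 b4 b5 b6 b7 b8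
def pvLocs2 (b2 b3 b4 b5 b6 b7 b8 : Bool) : List (Int × Int) := if b2 then (0, 2) :: pvLocs3 b3 b4 b5 b6 b7 b8 else pvLocs3 b3 b4 b5 b6 b7 b8
def pvLocs1 (b1 b2 b3 b4 b5 b6 b7 b8 : Bool) : List (Int × Int) := if b1 then (0, 1) :: pvLocs2 b2 b3 b4 b5 b6 b7 b8 else pvLocs2 b2 b3 b4 b5 b6 b7 b8
def pvLocsOf (b0 b1 b2 b3 b4 b5 b6 b7 b8 : Bool) : List (Int × Int) := if b0 then (0, 0) :: pvLocs1 b1 b2 b3 b4 b5 b6 b7 b8 else pvLocs1 b1 b2 b3 b4 b5 b6 b7 b8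

theorem pvFilter_pairs (f : Int × Int → Bool) :
    pvPairs.filter f = pvLocsOf (f (0, 0)) (f (0, 1)) (f (0, 2)) (f (1, 0)) (f (1, 1)) (f (1, 2))
      (f (2, 0)) (f (2, 1)) (f (2, 2)) := by
  simp only [pvPairs, List.filter_cons, List.filter_nil, pvLocsOf, pvLocs1, pvLocs2, pvLocs3,
    pvLocs4, pvLocs5, pvLocs6, pvLocs7, pvLocs8]

-- the combinatorial core: on every sublist of the nine positions, A's combination scan
-- counts exactly the winning lines contained in it
set_option maxRecDepth 10000 in
theorem pvKey : ∀ b0 b1 b2 b3 b4 b5 b6 b7 b8 : Bool,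
    pvBingoA (pvLocsOf b0 b1 b2 b3 b4 b5 b6 b7 b8) =
      pvLineCount (pvLocsOf b0 b1 b2 b3 b4 b5 b6 b7 b8) := by decide

theorem pvPairs_nodup : pvPairs.Nodup := by decide

-- ===== VERDICT (by name: the statement is the Claim_ definition above) =====
theorem array_check_spec : Claim_equal_array_check := by
  intro array _ _
  unfold Spec_array_check array_check array_check_alt
  rw [pvScanA_pairs, pvScanB_pairs, pvFoldA,
    pvFoldB array pvPairs 0 0 PySem.Set.empty PySem.Set.empty pvPairs_nodup
      (by intro p _ h; simp [PySem.Set.empty] at h) (by intro p _ h; simp [PySem.Set.empty] at h)]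
  simp only [PySem.Set.empty, List.nil_append, zero_add]
  rw [pvFilter_pairs (pvIsO array), pvFilter_pairs (pvIsX array), pvKey, pvKey]
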